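-- pv_equiv track=rewrite | github.com/jeonhl7579/Personal-Algorithm | SDS온라인스터디/3주차/BOJ14620.py | planting
-- ===== SOURCE A (Python) =====
-- def planting(arr,n,i,j,k):
--     fp=[[0,0],[-1,0],[0,1],[1,0],[0,-1]]
--     li=[]
--     result=0
--     for f in [i,j,k]:
--         x=f//n
--         y=f%n
--
--         for d in range(5):
--             nx=x+fp[d][0]
--             ny=y+fp[d][1]
--             if nx<0 or ny<0 or nx>=n or ny>=n:
--                 continue
--             li.append((nx,ny))
--             result+=arr[nx][ny]
--     # li에 값을 추가할때 []를 넣게 되면 리스트를 추가하는 것이므로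
--     # unhasable한 값이기 때문에 set으로 바꿔줄떄 오류가 나오게 된다.
--     if len(set(li))==15:
--         return result
--     return 10000
-- ===== SOURCE B (Python) =====
-- def planting(arr, n, i, j, k):
--     # Closed-form check on the three centers instead of building the 15-cell list:
--     # a center must be interior, and two plus-shapes overlap iff Manhattan distance <= 2.
--     cs = [divmod(f, n) for f in (i, j, k)]
--     if any(not (1 <= x <= n - 2 and 1 <= y <= n - 2) for x, y in cs):
--         return 10000
--     (x1, y1), (x2, y2), (x3, y3) = cs
--     if (abs(x1 - x2) + abs(y1 - y2) <= 2
--             or abs(x1 - x3) + abs(y1 - y3) <= 2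
--             or abs(x2 - x3) + abs(y2 - y3) <= 2):
--         return 10000
--     return sum(arr[x + dx][y + dy] for x, y in cs
--                for dx, dy in ((0, 0), (-1, 0), (0, 1), (1, 0), (0, -1)))
-- ===== Notes on version B (the rewrite author's own statement) =====
-- stated objective: simpler
-- what changed: A builds the list of all in-bounds plus-cells and tests len(set)==15; B instead validates the three centers directly with a closed-form predicate (each interior, pairwise Manhattan distance >= 3, since two plus-shapes overlap iff distance <= 2) and only then sums the 15 cells.
import Mathlib
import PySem

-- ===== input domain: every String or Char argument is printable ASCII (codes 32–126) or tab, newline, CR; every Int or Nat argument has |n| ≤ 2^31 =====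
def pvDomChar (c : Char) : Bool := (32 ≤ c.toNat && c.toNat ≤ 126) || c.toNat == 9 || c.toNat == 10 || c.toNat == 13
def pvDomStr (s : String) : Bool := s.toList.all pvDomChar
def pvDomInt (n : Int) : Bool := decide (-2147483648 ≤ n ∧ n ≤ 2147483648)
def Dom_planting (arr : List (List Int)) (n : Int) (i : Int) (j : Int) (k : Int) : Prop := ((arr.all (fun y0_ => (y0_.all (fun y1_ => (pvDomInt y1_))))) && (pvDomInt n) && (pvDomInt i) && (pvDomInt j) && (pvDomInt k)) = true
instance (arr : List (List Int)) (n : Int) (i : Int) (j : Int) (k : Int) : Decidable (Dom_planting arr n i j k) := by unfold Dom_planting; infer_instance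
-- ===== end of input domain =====

-- B replaces A's "collect all plus-cells, then test len(set)==15" by a closed-form check on the three
-- centers (each interior, pairwise Manhattan distance ≥ 3); same return value, simpler decomposition.

-- ===== PORT A =====
-- the offset table fp of A
def pvFp : List (Int × Int) := [(0, 0), (-1, 0), (0, 1), (1, 0), (0, -1)]

def planting (arr : List (List Int)) (n : Int) (i : Int) (j : Int) (k : Int) : Int :=
  -- for f in [i,j,k]: x=f//n; y=f%n; for d in range(5): guard, append, accumulate
  let r := [i, j, k].foldl (fun (s : List (Int × Int) × Int) f =>
      let x := PySem.Int.floordiv f n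
      let y := PySem.Int.mod f n
      pvFp.foldl (fun (t : List (Int × Int) × Int) d =>
        if x + d.1 < 0 ∨ y + d.2 < 0 ∨ n ≤ x + d.1 ∨ n ≤ y + d.2 then t
        else (t.1 ++ [(x + d.1, y + d.2)],
              t.2 + PySem.List.pyGetD (PySem.List.pyGetD arr (x + d.1) []) (y + d.2) 0)) s)
    ([], 0)
  -- if len(set(li))==15: return result; return 10000
  if (PySem.Set.ofList r.1).length = 15 then r.2 else 10000

-- ===== PORT B =====
-- B's offset tuple ((0,0),(-1,0),(0,1),(1,0),(0,-1))
def pvOffsets : List (Int × Int) := [(0, 0), (-1, 0), (0, 1), (1, 0), (0, -1)]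

def planting_alt (arr : List (List Int)) (n : Int) (i : Int) (j : Int) (k : Int) : Int :=
  -- x, y = divmod(f, n) for each of the three flowers
  let x1 := PySem.Int.floordiv i n; let y1 := PySem.Int.mod i n
  let x2 := PySem.Int.floordiv j n; let y2 := PySem.Int.mod j n
  let x3 := PySem.Int.floordiv k n; let y3 := PySem.Int.mod k n
  -- every center interior?
  if ¬ ([(x1, y1), (x2, y2), (x3, y3)].all fun c =>
        decide (1 ≤ c.1 ∧ c.1 ≤ n - 2 ∧ 1 ≤ c.2 ∧ c.2 ≤ n - 2)) then 10000
  -- two plus-shapes overlap iff Manhattan distance ≤ 2  (Python abs ported as Int.natAbs cast — exact)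
  else if ((x1 - x2).natAbs : Int) + ((y1 - y2).natAbs : Int) ≤ 2
        ∨ ((x1 - x3).natAbs : Int) + ((y1 - y3).natAbs : Int) ≤ 2
        ∨ ((x2 - x3).natAbs : Int) + ((y2 - y3).natAbs : Int) ≤ 2 then 10000
  else
    -- sum of arr over the 5 plus-cells of each center
    [(x1, y1), (x2, y2), (x3, y3)].foldl (fun acc c =>
      pvOffsets.foldl (fun acc d =>
        acc + PySem.List.pyGetD (PySem.List.pyGetD arr (c.1 + d.1) []) (c.2 + d.2) 0) acc) 0

-- ===== PRECONDITION & SPEC =====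
-- Pre_ = exactly the inputs on which the Python A returns: n ≠ 0 (else f//n raises
-- ZeroDivisionError), and every plus-cell that passes A's 0 ≤ · < n guard really exists in arr
-- (else arr[nx][ny] raises IndexError).  A shape condition on the input, nothing simulated.
def Pre_planting (arr : List (List Int)) (n : Int) (i : Int) (j : Int) (k : Int) : Prop :=
  n ≠ 0 ∧ ∀ f ∈ [i, j, k], ∀ d ∈ [((0 : Int), (0 : Int)), (-1, 0), (0, 1), (1, 0), (0, -1)],
    (0 ≤ PySem.Int.floordiv f n + d.1 ∧ PySem.Int.floordiv f n + d.1 < n ∧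
     0 ≤ PySem.Int.mod f n + d.2 ∧ PySem.Int.mod f n + d.2 < n) →
    ((PySem.Int.floordiv f n + d.1).toNat < arr.length ∧
     (PySem.Int.mod f n + d.2).toNat < (arr.getD (PySem.Int.floordiv f n + d.1).toNat []).length)
instance (arr : List (List Int)) (n : Int) (i : Int) (j : Int) (k : Int) : Decidable (Pre_planting arr n i j k) := by unfold Pre_planting; infer_instance

def pvWitness_planting : List (List Int) × Int × Int × Int × Int :=
  ([[1, 2, 3, 4, 5, 6], [6, 5, 4, 3, 2, 1], [1, 1, 1, 1, 1, 1], [2, 2, 2, 2, 2, 2],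
    [3, 3, 3, 3, 3, 3], [4, 4, 4, 4, 4, 4]], 6, 7, 10, 25)

def Spec_planting (arr : List (List Int)) (n : Int) (i : Int) (j : Int) (k : Int) (out : Int) : Prop := out = planting_alt arr n i j k
instance (arr : List (List Int)) (n : Int) (i : Int) (j : Int) (k : Int) (out : Int) : Decidable (Spec_planting arr n i j k out) := by unfold Spec_planting; infer_instance

-- ===== CLAIM (what is proved, stated in full; the proofs are below) =====
def Claim_equal_planting : Prop := ∀ (arr : List (List Int)) (n : Int) (i : Int) (j : Int) (k : Int), Dom_planting arr n i j k → Pre_planting arr n i j k → Spec_planting arr n i j k (planting arr n i j k)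

-- ===== LEMMAS AND PROOFS =====

-- the five plus-cells of the center (x, y), in the shape `x + d` that the ports produce
def pvCells (x y : Int) : List (Int × Int) :=
  [(x + 0, y + 0), (x + (-1), y + 0), (x + 0, y + 1), (x + 1, y + 0), (x + 0, y + (-1))]

-- the cells A actually keeps: those inside the n × n board
def pvF (n x y : Int) : List (Int × Int) :=
  (pvCells x y).filter (fun c => decide (¬ (c.1 < 0 ∨ c.2 < 0 ∨ n ≤ c.1 ∨ n ≤ c.2)))

-- arr[c.1][c.2] (total form; exact on in-range indices, which Pre_ guarantees for kept cells)
def pvVal (arr : List (List Int)) (c : Int × Int) : Int :=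
  PySem.List.pyGetD (PySem.List.pyGetD arr c.1 []) c.2 0

theorem pv_foldl_filter {α : Type} (p : α → Prop) [DecidablePred p] (v : α → Int) :
    ∀ (cs : List α) (s : List α × Int),
      cs.foldl (fun t c => if p c then t else (t.1 ++ [c], t.2 + v c)) s
        = (s.1 ++ cs.filter (fun c => decide (¬ p c)),
           s.2 + ((cs.filter (fun c => decide (¬ p c))).map v).sum) := by
  intro cs
  induction cs with
  | nil => intro s; simp
  | cons c cs ih =>
      intro s
      by_cases h : p c <;> simp [List.foldl_cons, h, ih, add_assoc]

-- A's inner loop appends exactly the in-board cells and adds their values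
theorem pv_inner_eq (arr : List (List Int)) (n x y : Int) (s : List (Int × Int) × Int) :
    pvFp.foldl (fun (t : List (Int × Int) × Int) d =>
        if x + d.1 < 0 ∨ y + d.2 < 0 ∨ n ≤ x + d.1 ∨ n ≤ y + d.2 then t
        else (t.1 ++ [(x + d.1, y + d.2)],
              t.2 + PySem.List.pyGetD (PySem.List.pyGetD arr (x + d.1) []) (y + d.2) 0)) s
      = (s.1 ++ pvF n x y, s.2 + ((pvF n x y).map (pvVal arr)).sum) := by
  have hm : pvCells x y = pvFp.map (fun d : Int × Int => (x + d.1, y + d.2)) := by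
    simp [pvCells, pvFp]
  have h3 := pv_foldl_filter (fun c : Int × Int => c.1 < 0 ∨ c.2 < 0 ∨ n ≤ c.1 ∨ n ≤ c.2)
    (pvVal arr) (pvCells x y) s
  unfold pvF
  rw [← h3, hm, List.foldl_map]
  rfl

theorem pv_A_char (arr : List (List Int)) (n i j k : Int) :
    planting arr n i j k =
      (if (PySem.Set.ofList
            (pvF n (PySem.Int.floordiv i n) (PySem.Int.mod i n)
              ++ pvF n (PySem.Int.floordiv j n) (PySem.Int.mod j n)
              ++ pvF n (PySem.Int.floordiv k n) (PySem.Int.mod k n))).length = 15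
       then ((pvF n (PySem.Int.floordiv i n) (PySem.Int.mod i n)).map (pvVal arr)).sum
            + ((pvF n (PySem.Int.floordiv j n) (PySem.Int.mod j n)).map (pvVal arr)).sum
            + ((pvF n (PySem.Int.floordiv k n) (PySem.Int.mod k n)).map (pvVal arr)).sum
       else 10000) := by
  unfold planting
  rw [List.foldl_cons, List.foldl_cons, List.foldl_cons, List.foldl_nil]
  rw [pv_inner_eq, pv_inner_eq, pv_inner_eq]
  simp [List.append_assoc, add_assoc]

-- B's inner sum loop
theorem pv_sum_inner (arr : List (List Int)) (x y acc : Int) :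
    pvOffsets.foldl (fun acc d =>
        acc + PySem.List.pyGetD (PySem.List.pyGetD arr (x + d.1) []) (y + d.2) 0) acc
      = acc + ((pvCells x y).map (pvVal arr)).sum := by
  simp [pvOffsets, pvCells, pvVal, List.foldl, add_assoc]

theorem pv_B_char (arr : List (List Int)) (n i j k : Int) :
    planting_alt arr n i j k =
      (if (1 ≤ PySem.Int.floordiv i n ∧ PySem.Int.floordiv i n ≤ n - 2 ∧
            1 ≤ PySem.Int.mod i n ∧ PySem.Int.mod i n ≤ n - 2) ∧
          (1 ≤ PySem.Int.floordiv j n ∧ PySem.Int.floordiv j n ≤ n - 2 ∧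
            1 ≤ PySem.Int.mod j n ∧ PySem.Int.mod j n ≤ n - 2) ∧
          (1 ≤ PySem.Int.floordiv k n ∧ PySem.Int.floordiv k n ≤ n - 2 ∧
            1 ≤ PySem.Int.mod k n ∧ PySem.Int.mod k n ≤ n - 2)
       then
        (if ((PySem.Int.floordiv i n - PySem.Int.floordiv j n).natAbs : Int)
              + ((PySem.Int.mod i n - PySem.Int.mod j n).natAbs : Int) ≤ 2
            ∨ ((PySem.Int.floordiv i n - PySem.Int.floordiv k n).natAbs : Int)
              + ((PySem.Int.mod i n - PySem.Int.mod k n).natAbs : Int) ≤ 2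
            ∨ ((PySem.Int.floordiv j n - PySem.Int.floordiv k n).natAbs : Int)
              + ((PySem.Int.mod j n - PySem.Int.mod k n).natAbs : Int) ≤ 2
         then 10000
         else ((pvCells (PySem.Int.floordiv i n) (PySem.Int.mod i n)).map (pvVal arr)).sum
              + ((pvCells (PySem.Int.floordiv j n) (PySem.Int.mod j n)).map (pvVal arr)).sum
              + ((pvCells (PySem.Int.floordiv k n) (PySem.Int.mod k n)).map (pvVal arr)).sum)
       else 10000) := by
  by_cases hI : (1 ≤ PySem.Int.floordiv i n ∧ PySem.Int.floordiv i n ≤ n - 2 ∧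
            1 ≤ PySem.Int.mod i n ∧ PySem.Int.mod i n ≤ n - 2) ∧
          (1 ≤ PySem.Int.floordiv j n ∧ PySem.Int.floordiv j n ≤ n - 2 ∧
            1 ≤ PySem.Int.mod j n ∧ PySem.Int.mod j n ≤ n - 2) ∧
          (1 ≤ PySem.Int.floordiv k n ∧ PySem.Int.floordiv k n ≤ n - 2 ∧
            1 ≤ PySem.Int.mod k n ∧ PySem.Int.mod k n ≤ n - 2)
  · obtain ⟨hI1, hI2, hI3⟩ := hI
    simp [planting_alt, hI1, hI2, hI3, hI1.1, hI1.2.1, hI1.2.2.1, hI1.2.2.2,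
      hI2.1, hI2.2.1, hI2.2.2.1, hI2.2.2.2, hI3.1, hI3.2.1, hI3.2.2.1, hI3.2.2.2,
      pv_sum_inner, add_assoc]
  · rw [if_neg hI]
    have hfalse : ¬ ([( PySem.Int.floordiv i n, PySem.Int.mod i n),
        (PySem.Int.floordiv j n, PySem.Int.mod j n),
        (PySem.Int.floordiv k n, PySem.Int.mod k n)].all fun c =>
        decide (1 ≤ c.1 ∧ c.1 ≤ n - 2 ∧ 1 ≤ c.2 ∧ c.2 ≤ n - 2)) = true := by
      simp only [List.all_cons, List.all_nil, Bool.and_true, Bool.and_eq_true,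
        decide_eq_true_eq]
      tauto
    simp only [planting_alt]
    rw [if_pos hfalse]

theorem pv_F_interior (n x y : Int) (h : 1 ≤ x ∧ x ≤ n - 2 ∧ 1 ≤ y ∧ y ≤ n - 2) :
    pvF n x y = pvCells x y := by
  unfold pvF
  rw [List.filter_eq_self]
  intro c hc
  simp only [pvCells, List.mem_cons, List.not_mem_nil, or_false] at hc
  rcases hc with h' | h' | h' | h' | h' <;> subst h' <;> simp <;> omega

theorem pv_F_len_le (n x y : Int) : (pvF n x y).length ≤ 5 := by
  refine le_trans (List.length_filter_le _ _) ?_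
  simp [pvCells]

theorem pv_F_not_interior (n x y : Int) (h : ¬ (1 ≤ x ∧ x ≤ n - 2 ∧ 1 ≤ y ∧ y ≤ n - 2)) :
    (pvF n x y).length ≤ 4 := by
  have hlt : (pvF n x y).length < (pvCells x y).length := by
    apply List.length_filter_lt_length_iff_exists.mpr
    push_neg at h
    simp only [pvCells]
    by_cases h1 : 1 ≤ x
    · by_cases h2 : x ≤ n - 2
      · by_cases h3 : 1 ≤ y
        · exact ⟨(x + 0, y + 1), by simp, by simp; omega⟩
        · exact ⟨(x + 0, y + (-1)), by simp, by simp; omega⟩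
      · exact ⟨(x + 1, y + 0), by simp, by simp; omega⟩
    · exact ⟨(x + (-1), y + 0), by simp, by simp; omega⟩
  have : (pvCells x y).length = 5 := by simp [pvCells]
  omega

theorem pv_setlen_eq_iff {α : Type} [BEq α] [LawfulBEq α] [DecidableEq α] (L : List α) :
    (PySem.Set.ofList L).length = L.length ↔ L.Nodup := by
  constructor
  · intro h
    have hft : (PySem.Set.ofList L).toFinset = L.toFinset := by
      ext a; simp [List.mem_toFinset, PySem.Set.mem_ofList]
    have hc1 : (PySem.Set.ofList L).toFinset.card = (PySem.Set.ofList L).length :=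
      List.toFinset_card_of_nodup (PySem.Set.nodup_ofList L)
    have hc2 : L.toFinset.card = L.length := by rw [← hft, hc1, h]
    exact Multiset.toFinset_card_eq_card_iff_nodup.mp hc2
  · intro h
    rw [PySem.Set.ofList_eq_self_of_nodup L h]

set_option maxHeartbeats 2000000 in
theorem pv_far_nodup (x1 y1 x2 y2 x3 y3 : Int)
    (hC : ¬ (((x1 - x2).natAbs : Int) + ((y1 - y2).natAbs : Int) ≤ 2
        ∨ ((x1 - x3).natAbs : Int) + ((y1 - y3).natAbs : Int) ≤ 2
        ∨ ((x2 - x3).natAbs : Int) + ((y2 - y3).natAbs : Int) ≤ 2)) :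
    (pvCells x1 y1 ++ pvCells x2 y2 ++ pvCells x3 y3).Nodup := by
  simp only [pvCells, List.cons_append, List.nil_append,
    List.nodup_cons, List.mem_cons, List.mem_append, List.not_mem_nil, or_false,
    Prod.mk.injEq, not_or, List.nodup_nil, and_true]
  push_neg at hC
  repeat' apply And.intro
  all_goals first | omega | trivial

theorem pv_pair_overlap (x1 y1 x2 y2 : Int)
    (h : ((x1 - x2).natAbs : Int) + ((y1 - y2).natAbs : Int) ≤ 2) :
    ∃ c, c ∈ pvCells x1 y1 ∧ c ∈ pvCells x2 y2 := by
  have hx : x1 - x2 = -2 ∨ x1 - x2 = -1 ∨ x1 - x2 = 0 ∨ x1 - x2 = 1 ∨ x1 - x2 = 2 := by omega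
  have hy : y1 - y2 = -2 ∨ y1 - y2 = -1 ∨ y1 - y2 = 0 ∨ y1 - y2 = 1 ∨ y1 - y2 = 2 := by omega
  rcases hx with h' | h' | h' | h' | h' <;> rcases hy with g | g | g | g | g <;>
  first
    | exact ⟨(x1 + 0, y1 + 0), by simp [pvCells], by simp [pvCells, Prod.mk.injEq]; omega⟩
    | exact ⟨(x1 + (-1), y1 + 0), by simp [pvCells], by simp [pvCells, Prod.mk.injEq]; omega⟩
    | exact ⟨(x1 + 1, y1 + 0), by simp [pvCells], by simp [pvCells, Prod.mk.injEq]; omega⟩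
    | exact ⟨(x1 + 0, y1 + 1), by simp [pvCells], by simp [pvCells, Prod.mk.injEq]; omega⟩
    | exact ⟨(x1 + 0, y1 + (-1)), by simp [pvCells], by simp [pvCells, Prod.mk.injEq]; omega⟩

theorem pv_pair_not_nodup (x1 y1 x2 y2 : Int)
    (h : ((x1 - x2).natAbs : Int) + ((y1 - y2).natAbs : Int) ≤ 2) :
    ¬ (pvCells x1 y1 ++ pvCells x2 y2).Nodup := by
  intro hnd
  obtain ⟨c, hc1, hc2⟩ := pv_pair_overlap x1 y1 x2 y2 h
  exact List.disjoint_of_nodup_append hnd hc1 hc2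

theorem pv_close_not_nodup (x1 y1 x2 y2 x3 y3 : Int)
    (hC : ((x1 - x2).natAbs : Int) + ((y1 - y2).natAbs : Int) ≤ 2
        ∨ ((x1 - x3).natAbs : Int) + ((y1 - y3).natAbs : Int) ≤ 2
        ∨ ((x2 - x3).natAbs : Int) + ((y2 - y3).natAbs : Int) ≤ 2) :
    ¬ (pvCells x1 y1 ++ pvCells x2 y2 ++ pvCells x3 y3).Nodup := by
  intro hnd
  rcases hC with h | h | h
  · exact pv_pair_not_nodup x1 y1 x2 y2 h
      (hnd.sublist (List.sublist_append_left _ _))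
  · refine pv_pair_not_nodup x1 y1 x3 y3 h (hnd.sublist ?_)
    rw [List.append_assoc]
    exact ((List.sublist_append_right (pvCells x2 y2) (pvCells x3 y3)).append_left _)
  · refine pv_pair_not_nodup x2 y2 x3 y3 h (hnd.sublist ?_)
    rw [List.append_assoc]
    exact List.sublist_append_right _ _

-- the branch analysis, over arbitrary centers
theorem pv_core (arr : List (List Int)) (n x1 y1 x2 y2 x3 y3 : Int) :
    (if (PySem.Set.ofList (pvF n x1 y1 ++ pvF n x2 y2 ++ pvF n x3 y3)).length = 15
     then ((pvF n x1 y1).map (pvVal arr)).sum + ((pvF n x2 y2).map (pvVal arr)).sum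
          + ((pvF n x3 y3).map (pvVal arr)).sum
     else 10000)
    = (if (1 ≤ x1 ∧ x1 ≤ n - 2 ∧ 1 ≤ y1 ∧ y1 ≤ n - 2) ∧
          (1 ≤ x2 ∧ x2 ≤ n - 2 ∧ 1 ≤ y2 ∧ y2 ≤ n - 2) ∧
          (1 ≤ x3 ∧ x3 ≤ n - 2 ∧ 1 ≤ y3 ∧ y3 ≤ n - 2)
       then
        (if ((x1 - x2).natAbs : Int) + ((y1 - y2).natAbs : Int) ≤ 2
            ∨ ((x1 - x3).natAbs : Int) + ((y1 - y3).natAbs : Int) ≤ 2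
            ∨ ((x2 - x3).natAbs : Int) + ((y2 - y3).natAbs : Int) ≤ 2
         then 10000
         else ((pvCells x1 y1).map (pvVal arr)).sum + ((pvCells x2 y2).map (pvVal arr)).sum
              + ((pvCells x3 y3).map (pvVal arr)).sum)
       else 10000) := by
  by_cases hI : (1 ≤ x1 ∧ x1 ≤ n - 2 ∧ 1 ≤ y1 ∧ y1 ≤ n - 2) ∧
      (1 ≤ x2 ∧ x2 ≤ n - 2 ∧ 1 ≤ y2 ∧ y2 ≤ n - 2) ∧
      (1 ≤ x3 ∧ x3 ≤ n - 2 ∧ 1 ≤ y3 ∧ y3 ≤ n - 2)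
  · rw [if_pos hI]
    rw [pv_F_interior n x1 y1 hI.1, pv_F_interior n x2 y2 hI.2.1, pv_F_interior n x3 y3 hI.2.2]
    by_cases hC : ((x1 - x2).natAbs : Int) + ((y1 - y2).natAbs : Int) ≤ 2
        ∨ ((x1 - x3).natAbs : Int) + ((y1 - y3).natAbs : Int) ≤ 2
        ∨ ((x2 - x3).natAbs : Int) + ((y2 - y3).natAbs : Int) ≤ 2
    · rw [if_pos hC, if_neg]
      intro heq
      have hlen : (pvCells x1 y1 ++ pvCells x2 y2 ++ pvCells x3 y3).length = 15 := by
        simp [pvCells]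
      have hnd := (pv_setlen_eq_iff (pvCells x1 y1 ++ pvCells x2 y2 ++ pvCells x3 y3)).mp
        (by rw [heq, hlen])
      exact pv_close_not_nodup x1 y1 x2 y2 x3 y3 hC hnd
    · rw [if_neg hC, if_pos]
      have hnd := pv_far_nodup x1 y1 x2 y2 x3 y3 hC
      rw [PySem.Set.ofList_eq_self_of_nodup _ hnd]
      simp [pvCells]
  · rw [if_neg hI, if_neg]
    intro heq
    have hle := PySem.Set.length_ofList_le (pvF n x1 y1 ++ pvF n x2 y2 ++ pvF n x3 y3)
    have hb : (pvF n x1 y1).length ≤ 4 ∨ (pvF n x2 y2).length ≤ 4 ∨ (pvF n x3 y3).length ≤ 4 := by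
      by_cases h1 : 1 ≤ x1 ∧ x1 ≤ n - 2 ∧ 1 ≤ y1 ∧ y1 ≤ n - 2
      · by_cases h2 : 1 ≤ x2 ∧ x2 ≤ n - 2 ∧ 1 ≤ y2 ∧ y2 ≤ n - 2
        · exact Or.inr (Or.inr (pv_F_not_interior n x3 y3 (fun h3 => hI ⟨h1, h2, h3⟩)))
        · exact Or.inr (Or.inl (pv_F_not_interior n x2 y2 h2))
      · exact Or.inl (pv_F_not_interior n x1 y1 h1)
    have h1 := pv_F_len_le n x1 y1
    have h2 := pv_F_len_le n x2 y2
    have h3 := pv_F_len_le n x3 y3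
    rw [List.length_append, List.length_append] at hle
    omega

-- ===== VERDICT (by name: the statement is the Claim_ definition above) =====
theorem planting_spec : Claim_equal_planting := by
  intro arr n i j k _hdom _hpre
  unfold Spec_planting
  rw [pv_A_char, pv_B_char, pv_core]
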